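-- pv_equiv track=rewrite | github.com/KarloHasnek/Algoritmi-i-Strukture-podataka | Labovi/Lab5/lab5.py | generiraj_strukturu_podataka
-- ===== SOURCE A (Python) =====
-- from string import punctuation
--
-- def generiraj_strukturu_podataka(recenica):
--     frekvencije = {}
--     for znak in recenica:
--         znak = znak.lower()  # Pretvorba u mala slova
--         if znak.isalnum() and not znak.isdigit() and znak != " " or znak in punctuation:
--             if znak in frekvencije:
--                 frekvencije[znak] += 1
--             else:
--                 frekvencije[znak] = 1
--     return frekvencije
-- ===== SOURCE B (Python) =====
-- from string import punctuation
--
--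
-- def generiraj_strukturu_podataka(recenica):
--     def go(znakovi):
--         if not znakovi:
--             return {}
--         prvi = znakovi[0]
--         ostatak = [z for z in znakovi[1:] if z != prvi]
--         rezultat = {prvi: len(znakovi) - len(ostatak)}
--         rezultat.update(go(ostatak))
--         return rezultat
--
--     filtrirano = [z for z in map(str.lower, recenica)
--                   if z.isalnum() and not z.isdigit() and z != " " or z in punctuation]
--     return go(filtrirano)
-- ===== Notes on version B (the rewrite author's own statement) =====
-- stated objective: alternative
-- what changed: Replaces A's single accumulating-dict loop by a recursive remove-and-count decomposition: build the filtered lowercased list once, then repeatedly take its first element, count it as the length drop when all its occurrences are removed, and recurse on the remainder.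
import Mathlib
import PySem

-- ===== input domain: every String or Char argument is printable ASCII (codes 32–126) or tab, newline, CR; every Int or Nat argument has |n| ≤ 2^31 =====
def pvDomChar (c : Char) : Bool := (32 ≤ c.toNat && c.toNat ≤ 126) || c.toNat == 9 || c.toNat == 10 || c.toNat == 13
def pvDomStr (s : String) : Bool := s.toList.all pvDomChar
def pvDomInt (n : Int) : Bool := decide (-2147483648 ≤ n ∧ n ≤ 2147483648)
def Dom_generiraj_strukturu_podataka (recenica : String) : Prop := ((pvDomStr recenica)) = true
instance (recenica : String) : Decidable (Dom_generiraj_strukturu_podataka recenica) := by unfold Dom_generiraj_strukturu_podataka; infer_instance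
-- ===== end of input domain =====

-- B replaces A's single accumulating dict loop by a recursive remove-and-count decomposition:
-- take the first filtered character, count it by removing all its occurrences, recurse on the
-- remainder (alternative decomposition, not faster).


-- ===== PORT A =====
-- string.punctuation
def pvPunct : List Char := "!\"#$%&'()*+,-./:;<=>?@[\\]^_`{|}~".toList

-- the shared filter condition; znak is a 1-character string in Python, so the string tests
-- znak.isalnum() / znak.isdigit() / znak != " " / znak in punctuation are exactly the
-- character tests below (exact for 1-character strings)
def pvKeep (z : Char) : Bool :=
  (PySem.Chars.isalnum z && !(PySem.Chars.isdigit z) && (z != ' ')) || pvPunct.contains z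

def generiraj_strukturu_podataka (recenica : String) : List (String × Int) :=
  (recenica.toList.foldl
    (fun (d : PySem.Dict String Int) ch =>
      let z := PySem.Chars.lowerChar ch          -- znak = znak.lower()
      if pvKeep z then
        let k := String.ofList [z]
        if d.contains k then d.insert k (d.getD k 0 + 1)   -- frekvencije[znak] += 1
        else d.insert k 1                                   -- frekvencije[znak] = 1
      else d)
    PySem.Dict.empty).items

-- ===== PORT B =====
-- go(znakovi): take the first kept character, remove all its occurrences from the tail,
-- record its count as the length difference, recurse on the remainder
-- ostatak = [z for z in znakovi[1:] if z != prvi]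
def pvRemove (prvi : String) (rep : List String) : List String :=
  rep.filter (fun z => z != prvi)

theorem pvRemove_length_le (prvi : String) (rep : List String) :
    (pvRemove prvi rep).length ≤ rep.length := List.length_filter_le _ _

def pvGo (znakovi : List String) : List (String × Int) :=
  match znakovi with
  | [] => []
  | prvi :: rep =>
    (prvi, ((prvi :: rep).length : Int) - ((pvRemove prvi rep).length : Int))
      :: pvGo (pvRemove prvi rep)
termination_by znakovi.length
decreasing_by
  simp only [List.length_cons]
  exact Nat.lt_succ_of_le (pvRemove_length_le _ _)

def generiraj_strukturu_podataka_alt (recenica : String) : List (String × Int) :=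
  -- filtrirano = [z for z in map(str.lower, recenica) if <keep z>]
  let filtrirano : List String :=
    (((recenica.toList.map PySem.Chars.lowerChar).filter pvKeep).map (fun z => String.ofList [z]))
  pvGo filtrirano

-- ===== PRECONDITION & SPEC =====
def Spec_generiraj_strukturu_podataka (recenica : String) (out : List (String × Int)) : Prop := out = generiraj_strukturu_podataka_alt recenica
instance (recenica : String) (out : List (String × Int)) : Decidable (Spec_generiraj_strukturu_podataka recenica out) := by unfold Spec_generiraj_strukturu_podataka; infer_instance

-- ===== CLAIM (what is proved, stated in full; the proofs are below) =====
def Claim_equal_generiraj_strukturu_podataka : Prop := ∀ (recenica : String), Dom_generiraj_strukturu_podataka recenica → Spec_generiraj_strukturu_podataka recenica (generiraj_strukturu_podataka recenica)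

-- ===== LEMMAS AND PROOFS =====

-- A's step is exactly the Counter step: when k is absent, d.getD k 0 = 0.
theorem pvStep_eq_counter_step (d : PySem.Dict String Int) (k : String) :
    (if d.contains k then d.insert k (d.getD k 0 + 1) else d.insert k 1)
      = d.insert k (d.getD k 0 + 1) := by
  by_cases h : d.contains k = true
  · simp [h]
  · simp only [Bool.not_eq_true] at h
    simp [h, PySem.Dict.getD_of_not_contains]

-- A's loop over the raw characters is the Counter loop over B's filtered list.
theorem pvFoldl_filtered (l : List Char) (d : PySem.Dict String Int) :
    l.foldl
      (fun (d : PySem.Dict String Int) ch =>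
        if pvKeep (PySem.Chars.lowerChar ch) then
          d.insert (String.ofList [PySem.Chars.lowerChar ch])
            (d.getD (String.ofList [PySem.Chars.lowerChar ch]) 0 + 1)
        else d) d
    = (((l.map PySem.Chars.lowerChar).filter pvKeep).map (fun z => String.ofList [z])).foldl
        (fun (d : PySem.Dict String Int) k => d.insert k (d.getD k 0 + 1)) d := by
  induction l generalizing d with
  | nil => rfl
  | cons c t ih =>
    by_cases h : pvKeep (PySem.Chars.lowerChar c) = true
    · simp only [List.foldl_cons, List.map_cons, List.filter_cons, h, if_pos]
      exact ih _
    · simp only [Bool.not_eq_true] at h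
      simp only [List.foldl_cons, List.map_cons, List.filter_cons, h]
      exact ih _

-- set-building with an accumulator: an element already at the front stays at the front and
-- absorbs its later duplicates
theorem pvOfList_cons_acc (l : List String) (a : String) (s : List String) :
    List.foldl PySem.Set.add (a :: s) l
      = a :: List.foldl PySem.Set.add s (l.filter (fun x => x != a)) := by
  induction l generalizing s with
  | nil => rfl
  | cons x t ih =>
    by_cases h : x = a
    · subst h
      have hc : PySem.Set.contains (x :: s) x = true := by
        simp [PySem.Set.contains]
      simp only [List.foldl_cons, List.filter_cons, PySem.Set.add, hc, if_pos,
        bne_self_eq_false, Bool.false_eq_true, ite_false]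
      exact ih s
    · have hcc : PySem.Set.contains (a :: s) x = PySem.Set.contains s x := by
        simp only [PySem.Set.contains, List.contains_cons]
        simp only [Bool.or_eq_right_iff_imp, beq_iff_eq]
        intro hxa
        exact absurd hxa h
      have hbne : (x != a) = true := by simp [bne, h]
      simp only [List.foldl_cons, List.filter_cons, PySem.Set.add, hcc, hbne, if_pos]
      by_cases hs : PySem.Set.contains s x = true
      · simp only [hs, ite_true]
        exact ih s
      · simp only [Bool.not_eq_true] at hs
        simp only [hs, Bool.false_eq_true, ite_false, List.cons_append]
        exact ih (s ++ [x])

-- first-occurrence dedup, decomposed the way pvGo walks the list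
theorem pvDedup_cons (c : String) (t : List String) :
    PySem.List.dedup (c :: t) = c :: PySem.List.dedup (t.filter (fun x => x != c)) := by
  rw [PySem.List.dedup_eq_ofList, PySem.List.dedup_eq_ofList]
  show List.foldl PySem.Set.add (PySem.Set.add PySem.Set.empty c) t = _
  have h : PySem.Set.add PySem.Set.empty c = [c] := rfl
  rw [h, pvOfList_cons_acc]
  rfl

-- length difference recorded by pvGo = multiplicity of the removed element
theorem pvRemove_length (prvi : String) (rep : List String) :
    (pvRemove prvi rep).length = rep.length - List.count prvi rep := by
  unfold pvRemove
  induction rep with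
  | nil => rfl
  | cons x t ih =>
    have hcle : List.count prvi t <= t.length := List.count_le_length
    by_cases hx : x = prvi
    · subst hx
      simp only [List.filter_cons, bne_self_eq_false, Bool.false_eq_true, ite_false,
        List.count_cons, BEq.rfl, if_pos, List.length_cons, ih]
      omega
    · have hb : (x != prvi) = true := by simp [bne, hx]
      have hb2 : (x == prvi) = false := by simp [hx]
      simp only [List.filter_cons, hb, if_pos, List.length_cons, List.count_cons, hb2,
        Bool.false_eq_true, ite_false, ih]
      omega

-- pvGo computes, in first-occurrence order, each distinct element with its count
theorem pvGo_eq (l : List String) :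
    pvGo l = (PySem.List.dedup l).map (fun z => (z, (List.count z l : Int))) := by
  induction l using pvGo.induct with
  | case1 => simp [pvGo]
  | case2 prvi rep ih =>
    rw [pvGo]
    have hd : PySem.List.dedup (prvi :: rep)
        = prvi :: PySem.List.dedup (pvRemove prvi rep) := pvDedup_cons prvi rep
    rw [hd, List.map_cons]
    congr 1
    · have hle : List.count prvi rep ≤ rep.length := List.count_le_length
      have hf := pvRemove_length prvi rep
      have hcnt : List.count prvi (prvi :: rep) = List.count prvi rep + 1 := by
        simp
      simp only [Prod.mk.injEq, true_and, hcnt, List.length_cons, hf]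
      omega
    · rw [ih]
      apply List.map_congr_left
      intro z hz
      have hzm : z ∈ pvRemove prvi rep := (PySem.List.mem_dedup _ _).1 hz
      have hzne : (z != prvi) = true := (List.mem_filter.1 hzm).2
      have hzc : z ≠ prvi := by simpa [bne] using hzne
      have h1 : List.count z (pvRemove prvi rep) = List.count z rep :=
        List.count_filter hzne
      have h2 : List.count z (prvi :: rep) = List.count z rep := by
        simp [Ne.symm hzc]
      simp [h1, h2]

-- ===== VERDICT (by name: the statement is the Claim_ definition above) =====
theorem generiraj_strukturu_podataka_spec : Claim_equal_generiraj_strukturu_podataka := by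
  intro recenica _
  unfold Spec_generiraj_strukturu_podataka generiraj_strukturu_podataka generiraj_strukturu_podataka_alt
  simp only [pvStep_eq_counter_step]
  rw [pvFoldl_filtered, PySem.Dict.foldl_insert_getD_add_one_eq_counter,
    PySem.Dict.items_counter, pvGo_eq, PySem.List.dedup_eq_ofList]
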